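-- pv_equiv track=rewrite | github.com/Jefferyy-Peng/baselines | classification/run.py | extract_patient_ids
-- ===== SOURCE A (Python) =====
-- def extract_patient_ids(file_paths):
--
--     # Use a set to store unique patient IDs
--     patient_ids = []
--     path_dict = {}
--
--     for path in file_paths:
--         patient_id = path.split('/')[-1].split('_')[0]
--         if patient_id in path_dict.keys():
--             path_dict[patient_id].append(path)
--         else:
--             path_dict[patient_id] = [path]
--         if patient_id not in patient_ids:
--             patient_ids.append(patient_id)
--
--     return patient_ids, path_dict
-- ===== SOURCE B (Python) =====
-- def extract_patient_ids(file_paths):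
--     # Staged re-implementation: first derive the ordered distinct ids
--     # (dict.fromkeys dedup of the mapped ids), then build each group by
--     # filtering the whole path list per id, instead of A's single pass
--     # that incrementally maintains a dict and a parallel id list.
--     def pid(path):
--         return path.split('/')[-1].split('_')[0]
--     pids = [pid(p) for p in file_paths]
--     patient_ids = list(dict.fromkeys(pids))
--     path_dict = {i: [p for q, p in zip(pids, file_paths) if q == i]
--                  for i in patient_ids}
--     return patient_ids, path_dict
-- ===== Notes on version B (the rewrite author's own statement) =====
-- stated objective: alternative
-- what changed: B is a staged group-by: pass 1 computes the ordered distinct ids as dict.fromkeys(map(pid, paths)), pass 2 builds each group by filtering the whole path list per id; A instead does one pass that incrementally appends into a dict and maintains a parallel id list with a membership check.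
import Mathlib
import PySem

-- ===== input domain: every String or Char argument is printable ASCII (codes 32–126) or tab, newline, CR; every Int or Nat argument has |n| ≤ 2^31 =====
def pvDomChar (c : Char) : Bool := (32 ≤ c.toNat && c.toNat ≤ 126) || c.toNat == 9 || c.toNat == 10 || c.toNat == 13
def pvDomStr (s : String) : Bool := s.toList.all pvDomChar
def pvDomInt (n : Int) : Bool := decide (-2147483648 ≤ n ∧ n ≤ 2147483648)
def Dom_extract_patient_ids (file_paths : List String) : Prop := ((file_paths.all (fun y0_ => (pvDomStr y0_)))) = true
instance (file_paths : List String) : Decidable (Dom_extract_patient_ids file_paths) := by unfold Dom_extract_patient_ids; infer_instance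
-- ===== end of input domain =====

-- B is a staged group-by (ordered dedup of ids, then one filter per id) instead of
-- A's single incremental pass with a parallel id list (objective: alternative).

-- shared helper: path.split('/')[-1].split('_')[0]
-- (split with a nonempty separator always returns a nonempty list, so the
-- [-1] and [0] indexings never raise; .getD "" is therefore exact)
def pvPid (path : String) : String :=
  ((PySem.List.pyGet? ((PySem.Str.split? ((PySem.List.pyGet? ((PySem.Str.split? path "/").getD []) (-1)).getD "") "_").getD []) 0).getD "")

-- ===== PORT A =====
def extract_patient_ids (file_paths : List String) : List String × (List (String × List String)) :=
  let st := file_paths.foldl (fun (st : List String × PySem.Dict String (List String)) path =>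
    let patient_id := pvPid path
    let d := if st.2.contains patient_id then
               st.2.insert patient_id (st.2.getD patient_id [] ++ [path])
             else
               st.2.insert patient_id [path]
    let ids := if patient_id ∈ st.1 then st.1 else st.1 ++ [patient_id]
    (ids, d)) ([], PySem.Dict.empty)
  (st.1, st.2.items)

-- ===== PORT B =====
def extract_patient_ids_alt (file_paths : List String) : List String × (List (String × List String)) :=
  let pids := file_paths.map pvPid
  let patient_ids := PySem.List.dedup pids
  (patient_ids, patient_ids.map (fun i =>
    (i, ((pids.zip file_paths).filter (fun q => q.1 == i)).map (·.2))))

-- ===== PRECONDITION & SPEC =====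
def Spec_extract_patient_ids (file_paths : List String) (out : List String × (List (String × List String))) : Prop := out = extract_patient_ids_alt file_paths
instance (file_paths : List String) (out : List String × (List (String × List String))) : Decidable (Spec_extract_patient_ids file_paths out) := by unfold Spec_extract_patient_ids; infer_instance

-- ===== CLAIM =====
def Claim_equal_extract_patient_ids : Prop := ∀ (file_paths : List String), Dom_extract_patient_ids file_paths → Spec_extract_patient_ids file_paths (extract_patient_ids file_paths)

-- ===== LEMMAS AND PROOFS =====

-- one step of A's loop, from a state whose id list is the dict's key list,
-- equals the corresponding modify step with the key list re-derived
theorem pv_step_eq (d : PySem.Dict String (List String)) (path : String) :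
    (let patient_id := pvPid path
     let d' := if d.contains patient_id then
                 d.insert patient_id (d.getD patient_id [] ++ [path])
               else
                 d.insert patient_id [path]
     let ids := if patient_id ∈ d.keys then d.keys else d.keys ++ [patient_id]
     ((ids, d') : List String × PySem.Dict String (List String)))
    = ((d.modify (pvPid path) [] (fun l => l ++ [path])).keys,
        d.modify (pvPid path) [] (fun l => l ++ [path])) := by
  simp only [PySem.Dict.modify]
  by_cases h : d.contains (pvPid path) = true
  · rw [if_pos h, if_pos ((PySem.Dict.contains_iff_mem_keys d _).1 h),
      PySem.Dict.keys_insert_of_contains _ _ h]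
  · have h' : d.contains (pvPid path) = false := by simpa using h
    rw [if_neg h, if_neg (by simpa [PySem.Dict.contains_iff_mem_keys] using h),
      PySem.Dict.keys_insert_of_not_contains _ _ h',
      PySem.Dict.getD_of_not_contains _ _ h']
    simp

-- A's fold equals the modify-fold (with id list = its keys)
theorem pv_loop_eq (l : List String) (ids : List String) (d : PySem.Dict String (List String))
    (h : ids = d.keys) :
    l.foldl (fun (st : List String × PySem.Dict String (List String)) path =>
      let patient_id := pvPid path
      let d := if st.2.contains patient_id then
                 st.2.insert patient_id (st.2.getD patient_id [] ++ [path])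
               else
                 st.2.insert patient_id [path]
      let ids := if patient_id ∈ st.1 then st.1 else st.1 ++ [patient_id]
      (ids, d)) (ids, d)
    = (let D := l.foldl (fun (d : PySem.Dict String (List String)) path =>
        d.modify (pvPid path) [] (fun l => l ++ [path])) d
       (D.keys, D)) := by
  induction l generalizing ids d with
  | nil => simpa using h
  | cons p rest ih =>
    simp only [List.foldl_cons]
    subst h
    rw [show _ = _ from pv_step_eq d p]
    exact ih _ _ rfl

-- the modify-fold's keys are the first-seen-ordered distinct ids
theorem pv_keys (l : List String) :
    (l.foldl (fun (d : PySem.Dict String (List String)) path =>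
        d.modify (pvPid path) [] (fun l => l ++ [path])) PySem.Dict.empty).keys
      = PySem.List.dedup (l.map pvPid) := by
  rw [PySem.Dict.keys_foldl_modify_key]
  show PySem.Set.update ([] : List String) (l.map pvPid) = _
  rw [PySem.Set.update_nil_left]; simp

-- the modify-fold's lookup at any id is the filtered path list
theorem pv_getD (l : List String) (i : String) :
    (l.foldl (fun (d : PySem.Dict String (List String)) path =>
        d.modify (pvPid path) [] (fun l => l ++ [path])) PySem.Dict.empty).getD i []
      = l.filter (fun p => pvPid p == i) := by
  have := PySem.Dict.getD_foldl_modify_append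
    (l := l.map (fun p => (pvPid p, p))) (d := (PySem.Dict.empty : PySem.Dict String (List String))) (c := i)
  rw [List.foldl_map] at this
  simpa [List.filter_map, Function.comp_def] using this

-- ===== VERDICT =====
theorem extract_patient_ids_spec : Claim_equal_extract_patient_ids := by
  intro fps _
  unfold Spec_extract_patient_ids extract_patient_ids extract_patient_ids_alt
  rw [pv_loop_eq fps [] PySem.Dict.empty (by simp)]
  simp only
  refine Prod.ext (by simpa using pv_keys fps) ?_
  rw [PySem.Dict.items_eq_map_keys _ ?nd []]
  · rw [pv_keys fps]
    refine List.map_congr_left (fun i _ => ?_)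
    rw [pv_getD]
    have hz : ∀ (l : List String), (l.map pvPid).zip l = l.map (fun p => (pvPid p, p)) := by
      intro l; induction l with
      | nil => rfl
      | cons a t ih => simp [ih]
    rw [hz fps, List.filter_map, List.map_map]
    simp [Function.comp_def]
  · exact PySem.Dict.nodup_keys_foldl_modify_key fps pvPid [] _ _ (by simp)
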